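-- pv_equiv track=rewrite | github.com/modisfive/ProblemSolving | 백준/Gold/2482. 색상환/색상환.py | solve
-- ===== SOURCE A (Python) =====
-- MOD = 1000000003
--
-- def solve(r, c):
--     if c == 1:
--         return r
--
--     if r < 2 * c:
--         return 0
--
--     if dp[r][c] != -1:
--         return dp[r][c]
--
--     dp[r][c] = (solve(r - 1, c) + solve(r - 2, c - 1)) % MOD
--
--     return dp[r][c]
--
-- dp = [[-1] * 1001 for _ in range(1001)]
-- ===== SOURCE B (Python) =====
-- import math
--
-- MOD = 1000000003
--
-- def solve(r, c):
--     # Closed form: the number of ways to pick c pairwise non-adjacent points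
--     # on a circle of r points is C(r-c, c) + C(r-c-1, c-1).
--     if c == 1:
--         return r
--     if r < 2 * c:
--         return 0
--     return (math.comb(r - c, c) + math.comb(r - c - 1, c - 1)) % MOD
-- ===== Notes on version B (the rewrite author's own statement) =====
-- stated objective: faster
-- what changed: Replaces the memoized O(r*c)-state recursion over a 1001x1001 global table with the direct closed form C(r-c,c)+C(r-c-1,c-1) via math.comb, keeping the c==1 and r<2c guards.
import Mathlib
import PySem

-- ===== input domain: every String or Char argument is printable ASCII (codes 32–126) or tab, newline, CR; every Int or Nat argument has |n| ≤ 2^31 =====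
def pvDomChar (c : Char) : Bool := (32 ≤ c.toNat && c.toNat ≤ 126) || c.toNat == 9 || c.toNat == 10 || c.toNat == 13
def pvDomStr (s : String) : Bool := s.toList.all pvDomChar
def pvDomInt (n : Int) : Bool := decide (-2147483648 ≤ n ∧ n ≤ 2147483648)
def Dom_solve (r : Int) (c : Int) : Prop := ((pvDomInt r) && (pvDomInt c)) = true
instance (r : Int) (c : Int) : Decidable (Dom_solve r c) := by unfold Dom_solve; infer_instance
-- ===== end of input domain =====

-- B replaces A's memoized O(r*c) recursion by the closed form C(r-c,c)+C(r-c-1,c-1) (mod MOD).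

-- ===== PORT A =====
-- A's global memo 'dp' (a 1001x1001 list of lists) is ported as a flat Array Int of
-- size 1001*1001 threaded through the recursion (dp[r][c] ↦ dp[r*1001+c]); the stored
-- values are exactly the values Python stores. Python's unbounded recursion is given
-- fuel 4000; inside Pre_solve the recursion depth is at most r+c ≤ 1500, so the fuel
-- branch is never taken there.
def solveAux : Nat → Array Int → Int → Int → Array Int × Int
  | 0, dp, _, _ => (dp, 0)
  | fuel+1, dp, r, c =>
    if c = 1 then (dp, r)
    else if r < 2*c then (dp, 0)
    else
      let idx := (r*1001 + c).toNat
      let v := dp.getD idx 0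
      if v ≠ -1 then (dp, v)
      else
        let p1 := solveAux fuel dp (r-1) c
        let p2 := solveAux fuel p1.1 (r-2) (c-1)
        let w := (p1.2 + p2.2) % 1000000003
        (p2.1.setIfInBounds idx w, w)

def solve (r : Int) (c : Int) : Int :=
  (solveAux 4000 (Array.replicate (1001*1001) (-1)) r c).2

-- ===== PORT B =====
-- math.comb(n, k) (n, k ≥ 0 wherever B reaches it) is ported as Nat.choose.
def solve_alt (r : Int) (c : Int) : Int :=
  if c = 1 then r
  else if r < 2*c then 0
  else ((Nat.choose (r-c).toNat c.toNat + Nat.choose (r-c-1).toNat (c-1).toNat : Nat) : Int) % 1000000003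

-- ===== PRECONDITION & SPEC =====
-- Pre_solve is exactly the set of inputs on which A returns: outside it A raises
-- IndexError (r > 1000 overruns dp's 1001 rows; c ≤ 0 with 2*c ≤ r recurses c down
-- past -1001 and overruns a row).
def Pre_solve (r : Int) (c : Int) : Prop :=
  c = 1 ∨ r < 2*c ∨ (2 ≤ c ∧ 2*c ≤ r ∧ r ≤ 1000)
instance (r : Int) (c : Int) : Decidable (Pre_solve r c) := by unfold Pre_solve; infer_instance
def pvWitness_solve : Int × Int := (10, 3)

def Spec_solve (r : Int) (c : Int) (out : Int) : Prop := out = solve_alt r c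
instance (r : Int) (c : Int) (out : Int) : Decidable (Spec_solve r c out) := by unfold Spec_solve; infer_instance

-- ===== CLAIM (what is proved, stated in full; the proofs are below) =====
def Claim_equal_solve : Prop := ∀ (r : Int) (c : Int), Dom_solve r c → Pre_solve r c → Spec_solve r c (solve r c)

-- ===== LEMMAS AND PROOFS =====

-- The comb sum of the closed form, as an Int.
def Sint (r c : Int) : Int :=
  ((Nat.choose (r-c).toNat c.toNat + Nat.choose (r-c-1).toNat (c-1).toNat : Nat) : Int)

-- Double Pascal identity on Nat.choose.
lemma pascal2 (n k : Nat) (hn : 2 ≤ n) (hk : 2 ≤ k) :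
    n.choose k + (n-1).choose (k-1) =
      ((n-1).choose k + (n-2).choose (k-1)) + ((n-1).choose (k-1) + (n-2).choose (k-2)) := by
  obtain ⟨m, rfl⟩ : ∃ m, n = m + 2 := ⟨n - 2, by omega⟩
  obtain ⟨j, rfl⟩ : ∃ j, k = j + 2 := ⟨k - 2, by omega⟩
  simp only [Nat.add_sub_cancel, show m + 2 - 1 = m + 1 by omega, show j + 2 - 1 = j + 1 by omega]
  rw [show (m+2).choose (j+2) = (m+1).choose (j+1) + (m+1).choose (j+2) from Nat.choose_succ_succ _ _,
      show (m+1).choose (j+1) = m.choose j + m.choose (j+1) from Nat.choose_succ_succ _ _]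
  omega

-- The recurrence of A, satisfied by the comb sum.
lemma Sint_rec (r c : Int) (hc : 2 ≤ c) (hr : 2*c ≤ r) :
    Sint r c = Sint (r-1) c + Sint (r-2) (c-1) := by
  rcases eq_or_lt_of_le hr with h | h
  · -- r = 2c
    unfold Sint
    have e1 : (r - c).toNat = c.toNat := by omega
    have e2 : (r - c - 1).toNat = c.toNat - 1 := by omega
    have e3 : (r - 1 - c).toNat = c.toNat - 1 := by omega
    have e4 : (r - 1 - c - 1).toNat = c.toNat - 2 := by omega
    have e5 : (r - 2 - (c-1)).toNat = c.toNat - 1 := by omega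
    have e6 : (r - 2 - (c-1) - 1).toNat = c.toNat - 2 := by omega
    have e7 : (c - 1).toNat = c.toNat - 1 := by omega
    have e8 : (c - 1 - 1).toNat = c.toNat - 2 := by omega
    rw [e1, e2, e3, e4, e5, e6, e7, e8]
    rw [Nat.choose_self, Nat.choose_self, Nat.choose_self,
        Nat.choose_eq_zero_of_lt (by omega), Nat.choose_eq_zero_of_lt (by omega)]
    norm_num
  · -- r ≥ 2c + 1
    unfold Sint
    set n := (r - c).toNat with hn
    have hnk : 2 ≤ n := by omega
    have hkk : 2 ≤ c.toNat := by omega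
    have e2 : (r - c - 1).toNat = n - 1 := by omega
    have e3 : (r - 1 - c).toNat = n - 1 := by omega
    have e4 : (r - 1 - c - 1).toNat = n - 2 := by omega
    have e5 : (r - 2 - (c-1)).toNat = n - 1 := by omega
    have e6 : (r - 2 - (c-1) - 1).toNat = n - 2 := by omega
    have e7 : (c - 1).toNat = c.toNat - 1 := by omega
    have e8 : (c - 1 - 1).toNat = c.toNat - 2 := by omega
    rw [e2, e3, e4, e5, e6, e7, e8]
    have := pascal2 n c.toNat hnk hkk
    push_cast
    push_cast at this
    linarith

-- solve_alt agrees with Sint % MOD on the region the recursion visits.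
lemma alt_eq_main (r c : Int) (hc : 2 ≤ c) (hr : 2*c - 1 ≤ r) :
    solve_alt r c = Sint r c % 1000000003 := by
  unfold solve_alt Sint
  rcases lt_or_ge r (2*c) with h | h
  · have hr' : r = 2*c - 1 := by omega
    rw [if_neg (by omega), if_pos h]
    subst hr'
    rw [Nat.choose_eq_zero_of_lt (by omega), Nat.choose_eq_zero_of_lt (by omega)]
    simp
  · rw [if_neg (by omega), if_neg (by omega)]

lemma alt_eq_one (r : Int) (h1 : 1 ≤ r) (hr : r ≤ 1000) :
    solve_alt r 1 = Sint r 1 % 1000000003 := by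
  unfold solve_alt Sint
  rw [if_pos rfl]
  have e1 : (r - 1).toNat.choose (1:Int).toNat = (r-1).toNat := by
    simp [Nat.choose_one_right]
  have e2 : (r - 1 - 1).toNat.choose ((1:Int)-1).toNat = 1 := by simp
  rw [e1, e2]
  have : ((((r-1).toNat + 1 : Nat)) : Int) = r := by omega
  rw [this, Int.emod_eq_of_lt (by omega) (by omega)]

-- A's recurrence step equals the closed form.
lemma key (r c : Int) (hc : 2 ≤ c) (hr : 2*c ≤ r) (hr' : r ≤ 1000) :
    (solve_alt (r-1) c + solve_alt (r-2) (c-1)) % 1000000003 = solve_alt r c := by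
  have h1 : solve_alt (r-1) c = Sint (r-1) c % 1000000003 :=
    alt_eq_main (r-1) c hc (by omega)
  have h2 : solve_alt (r-2) (c-1) = Sint (r-2) (c-1) % 1000000003 := by
    rcases eq_or_lt_of_le hc with h | h
    · rw [← h]; exact alt_eq_one (r-2) (by omega) (by omega)
    · exact alt_eq_main (r-2) (c-1) (by omega) (by omega)
  rw [h1, h2, ← Int.add_emod, ← Sint_rec r c hc hr,
      alt_eq_main r c hc (by omega)]

-- Invariant on the memo array: right size, and every in-range cell is -1 or correct.
def MemoInv (dp : Array Int) : Prop :=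
  dp.size = 1001*1001 ∧
  ∀ r c : Int, 2 ≤ c → 2*c ≤ r → r ≤ 1000 →
    (dp.getD (r*1001 + c).toNat 0 = -1 ∨ dp.getD (r*1001 + c).toNat 0 = solve_alt r c)

lemma getD_setIfInBounds_getD (a : Array Int) (i j : Nat) (v : Int) (hj : j < a.size) :
    (a.setIfInBounds i v).getD j 0 = if i = j then v else a.getD j 0 := by
  simp [Array.getD, Array.size_setIfInBounds, hj, Array.getElem_setIfInBounds]

lemma idx_lt (r c : Int) (hc : 2 ≤ c) (hr : 2*c ≤ r) (hr' : r ≤ 1000) :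
    (r*1001 + c).toNat < 1001*1001 := by
  have hc' : c ≤ 500 := by omega
  have : r*1001 ≤ 1000*1001 := by nlinarith
  have : 0 ≤ r*1001 := by nlinarith
  omega

lemma idx_inj (r c r' c' : Int) (hc : 2 ≤ c) (hr : 2*c ≤ r) (hr' : r ≤ 1000)
    (hc2 : 2 ≤ c') (hr2 : 2*c' ≤ r') (hr2' : r' ≤ 1000)
    (h : (r*1001 + c).toNat = (r'*1001 + c').toNat) : r = r' ∧ c = c' := by
  have hc' : c ≤ 500 := by omega
  have hc2' : c' ≤ 500 := by omega
  have h0 : 0 ≤ r*1001 := by nlinarith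
  have h0' : 0 ≤ r'*1001 := by nlinarith
  have heq : r*1001 + c = r'*1001 + c' := by omega
  constructor <;> omega

lemma solveAux_correct (fuel : Nat) :
    ∀ (dp : Array Int) (r c : Int), MemoInv dp → 1 ≤ c → r ≤ 1000 → (r + c).toNat < fuel →
      MemoInv (solveAux fuel dp r c).1 ∧ (solveAux fuel dp r c).2 = solve_alt r c := by
  induction fuel with
  | zero => intro dp r c _ _ _ hf; omega
  | succ fuel ih =>
    intro dp r c hInv hc hr hf
    rw [solveAux]
    by_cases h1 : c = 1
    · subst h1
      rw [if_pos rfl]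
      exact ⟨hInv, by unfold solve_alt; rw [if_pos rfl]⟩
    · rw [if_neg h1]
      by_cases h2 : r < 2*c
      · rw [if_pos h2]
        exact ⟨hInv, by unfold solve_alt; rw [if_neg h1, if_pos h2]⟩
      · rw [if_neg h2]
        have hc2 : 2 ≤ c := by omega
        have hrc : 2*c ≤ r := by omega
        simp only []
        set idx := (r*1001 + c).toNat with hidx
        by_cases h3 : dp.getD idx 0 ≠ -1
        · rw [if_pos h3]
          refine ⟨hInv, ?_⟩
          rcases hInv.2 r c hc2 hrc hr with h | h
          · exact absurd h h3
          · exact h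
        · rw [if_neg h3]
          rw [not_not] at h3
          have hfa : (r - 1 + c).toNat < fuel := by omega
          have hfb : (r - 2 + (c - 1)).toNat < fuel := by omega
          obtain ⟨hI1, hv1⟩ := ih dp (r-1) c hInv hc (by omega) hfa
          obtain ⟨hI2, hv2⟩ := ih (solveAux fuel dp (r-1) c).1 (r-2) (c-1) hI1 (by omega) (by omega) hfb
          have hw : ((solveAux fuel dp (r-1) c).2 + (solveAux fuel (solveAux fuel dp (r-1) c).1 (r-2) (c-1)).2) % 1000000003 = solve_alt r c := by
            rw [hv1, hv2]; exact key r c hc2 hrc hr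
          refine ⟨⟨by rw [Array.size_setIfInBounds]; exact hI2.1, ?_⟩, hw⟩
          intro r' c' hc' hrc' hr'
          have hlt : idx < (solveAux fuel (solveAux fuel dp (r-1) c).1 (r-2) (c-1)).1.size := by
            rw [hI2.1]; exact idx_lt r c hc2 hrc hr
          have hlt' : (r'*1001 + c').toNat < (solveAux fuel (solveAux fuel dp (r-1) c).1 (r-2) (c-1)).1.size := by
            rw [hI2.1]; exact idx_lt r' c' hc' hrc' hr'
          rw [getD_setIfInBounds_getD _ _ _ _ hlt']
          by_cases heq : idx = (r'*1001 + c').toNat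
          · rw [if_pos heq]
            obtain ⟨hre, hce⟩ := idx_inj r c r' c' hc2 hrc hr hc' hrc' hr' heq
            right; rw [← hre, ← hce]; exact hw
          · rw [if_neg heq]
            exact hI2.2 r' c' hc' hrc' hr'

lemma memoInv_init : MemoInv (Array.replicate (1001*1001) (-1)) := by
  refine ⟨by simp, ?_⟩
  intro r c hc hrc hr
  left
  have := idx_lt r c hc hrc hr
  simp [Array.getD, this]

-- ===== VERDICT (by name: the statement is the Claim_ definition above) =====
theorem solve_spec : Claim_equal_solve := by
  intro r c _ hPre
  unfold Spec_solve solve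
  rcases hPre with h1 | h2 | ⟨hc, hrc, hr⟩
  · subst h1
    rw [show (4000:Nat) = 3999+1 from rfl, solveAux, if_pos rfl]
    unfold solve_alt; rw [if_pos rfl]
  · by_cases h1 : c = 1
    · subst h1
      rw [show (4000:Nat) = 3999+1 from rfl, solveAux, if_pos rfl]
      unfold solve_alt; rw [if_pos rfl]
    · rw [show (4000:Nat) = 3999+1 from rfl, solveAux, if_neg h1, if_pos h2]
      unfold solve_alt; rw [if_neg h1, if_pos h2]
  · exact (solveAux_correct 4000 (Array.replicate (1001*1001) (-1)) r c memoInv_init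
      (by omega) hr (by omega)).2
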